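-- pv_equiv track=rewrite | github.com/dubedad/JobForge-2.0 | src/jobforge/ingestion/caf.py | _infer_job_family_from_career_id
-- ===== SOURCE A (Python) =====
-- def _infer_job_family_from_career_id(career_id: str) -> str:
--     """Infer job family ID from career_id using title patterns.
--
--     Matches the inference logic from link_fetcher.py.
--
--     Args:
--         career_id: The career_id slug.
--
--     Returns:
--         Inferred job family ID.
--     """
--     career_lower = career_id.lower()
--
--     # Medical/Health careers
--     medical_keywords = [
--         "medical", "nurse", "physician", "dental", "pharmacy",
--         "health", "technologist", "physiotherapy", "bioscience",
--     ]
--     if any(kw in career_lower for kw in medical_keywords):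
--         return "medical-health"
--
--     # Engineering/Technical careers
--     engineering_keywords = [
--         "engineer", "technician", "systems", "electronics",
--         "construction", "electrical", "mechanical", "avionics",
--         "aerospace", "weapons", "marine-tech", "aviation",
--     ]
--     if any(kw in career_lower for kw in engineering_keywords):
--         return "engineering-technical"
--
--     # Combat/Operations careers
--     combat_keywords = [
--         "infantry", "armour", "artillery", "combat", "gunner",
--         "soldier", "warfare", "pilot", "diver",
--     ]
--     if any(kw in career_lower for kw in combat_keywords):
--         return "combat-operations"
--
--     # Intelligence/Signals careers
--     intel_keywords = [
--         "intelligence", "signals", "communicator", "cyber",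
--         "sensor", "operator", "sonar",
--     ]
--     if any(kw in career_lower for kw in intel_keywords):
--         return "intelligence-signals"
--
--     # Support/Logistics careers
--     support_keywords = [
--         "logistics", "supply", "traffic", "cook", "steward",
--         "postal", "firefighter", "mobile-support",
--     ]
--     if any(kw in career_lower for kw in support_keywords):
--         return "support-logistics"
--
--     # Administration/HR careers
--     admin_keywords = [
--         "admin", "human-resources", "financial", "legal",
--         "public-affairs", "chaplain", "personnel",
--     ]
--     if any(kw in career_lower for kw in admin_keywords):
--         return "administration-hr"
--
--     # Training/Development careers
--     training_keywords = ["training", "instruction", "development-officer"]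
--     if any(kw in career_lower for kw in training_keywords):
--         return "training-development"
--
--     # Police/Security careers
--     police_keywords = ["police", "military-police"]
--     if any(kw in career_lower for kw in police_keywords):
--         return "police-security"
--
--     # Music careers
--     if "musician" in career_lower:
--         return "music"
--
--     # Default: ncm-general or officer-general based on career pattern
--     if "officer" in career_lower:
--         return "officer-general"
--     else:
--         return "ncm-general"
-- ===== SOURCE B (Python) =====
-- # Families indexed by priority rank; the last entry is the no-match default.
-- _FAMILY_BY_RANK = [
--     "medical-health",        # 0
--     "engineering-technical", # 1
--     "combat-operations",     # 2
--     "intelligence-signals",  # 3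
--     "support-logistics",     # 4
--     "administration-hr",     # 5
--     "training-development",  # 6
--     "police-security",       # 7
--     "music",                 # 8
--     "officer-general",       # 9
--     "ncm-general",           # 10 (no keyword matched)
-- ]
--
-- # One flat keyword -> priority-rank map.
-- _KEYWORD_RANK = {
--     "medical": 0, "nurse": 0, "physician": 0, "dental": 0, "pharmacy": 0,
--     "health": 0, "technologist": 0, "physiotherapy": 0, "bioscience": 0,
--     "engineer": 1, "technician": 1, "systems": 1, "electronics": 1,
--     "construction": 1, "electrical": 1, "mechanical": 1, "avionics": 1,
--     "aerospace": 1, "weapons": 1, "marine-tech": 1, "aviation": 1,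
--     "infantry": 2, "armour": 2, "artillery": 2, "combat": 2, "gunner": 2,
--     "soldier": 2, "warfare": 2, "pilot": 2, "diver": 2,
--     "intelligence": 3, "signals": 3, "communicator": 3, "cyber": 3,
--     "sensor": 3, "operator": 3, "sonar": 3,
--     "logistics": 4, "supply": 4, "traffic": 4, "cook": 4, "steward": 4,
--     "postal": 4, "firefighter": 4, "mobile-support": 4,
--     "admin": 5, "human-resources": 5, "financial": 5, "legal": 5,
--     "public-affairs": 5, "chaplain": 5, "personnel": 5,
--     "training": 6, "instruction": 6, "development-officer": 6,
--     "police": 7, "military-police": 7,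
--     "musician": 8,
--     "officer": 9,
-- }
--
--
-- def _infer_job_family_from_career_id(career_id: str) -> str:
--     """Take the best (lowest) priority rank over every matching keyword,
--     then index the family table with it."""
--     career_lower = career_id.lower()
--     best = min(
--         (rank for kw, rank in _KEYWORD_RANK.items() if kw in career_lower),
--         default=len(_FAMILY_BY_RANK) - 1,
--     )
--     return _FAMILY_BY_RANK[best]
-- ===== Notes on version B (the rewrite author's own statement) =====
-- stated objective: simpler
-- what changed: Replaces the nine early-return if-any blocks by a single expression: one flat keyword->priority-rank dict is scanned once with min() (no conditionals, no early return) and the resulting rank indexes a family table whose last entry is the default.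
import Mathlib
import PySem

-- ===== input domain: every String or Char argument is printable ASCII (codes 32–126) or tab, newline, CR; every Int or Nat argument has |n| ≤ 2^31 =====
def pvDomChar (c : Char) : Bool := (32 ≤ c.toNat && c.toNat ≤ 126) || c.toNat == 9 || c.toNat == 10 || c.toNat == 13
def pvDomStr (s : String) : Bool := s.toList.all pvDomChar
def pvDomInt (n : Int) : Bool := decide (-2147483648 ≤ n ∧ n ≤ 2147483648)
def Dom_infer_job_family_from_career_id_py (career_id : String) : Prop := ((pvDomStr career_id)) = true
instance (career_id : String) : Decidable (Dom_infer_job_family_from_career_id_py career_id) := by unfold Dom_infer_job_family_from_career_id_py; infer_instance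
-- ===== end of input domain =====

-- B replaces A's nine early-return if-blocks by a min() over one flat keyword->rank map
-- followed by indexing a family table (simpler, same cost).

-- ===== PORT A =====
def infer_job_family_from_career_id_py (career_id : String) : String :=
  let career_lower := PySem.Str.lower career_id
  let medical_keywords : List String :=
    ["medical", "nurse", "physician", "dental", "pharmacy",
     "health", "technologist", "physiotherapy", "bioscience"]
  if medical_keywords.any (fun kw => PySem.Str.isIn kw career_lower) then
    "medical-health"
  else
  let engineering_keywords : List String :=
    ["engineer", "technician", "systems", "electronics",
     "construction", "electrical", "mechanical", "avionics",
     "aerospace", "weapons", "marine-tech", "aviation"]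
  if engineering_keywords.any (fun kw => PySem.Str.isIn kw career_lower) then
    "engineering-technical"
  else
  let combat_keywords : List String :=
    ["infantry", "armour", "artillery", "combat", "gunner",
     "soldier", "warfare", "pilot", "diver"]
  if combat_keywords.any (fun kw => PySem.Str.isIn kw career_lower) then
    "combat-operations"
  else
  let intel_keywords : List String :=
    ["intelligence", "signals", "communicator", "cyber",
     "sensor", "operator", "sonar"]
  if intel_keywords.any (fun kw => PySem.Str.isIn kw career_lower) then
    "intelligence-signals"
  else
  let support_keywords : List String :=
    ["logistics", "supply", "traffic", "cook", "steward",
     "postal", "firefighter", "mobile-support"]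
  if support_keywords.any (fun kw => PySem.Str.isIn kw career_lower) then
    "support-logistics"
  else
  let admin_keywords : List String :=
    ["admin", "human-resources", "financial", "legal",
     "public-affairs", "chaplain", "personnel"]
  if admin_keywords.any (fun kw => PySem.Str.isIn kw career_lower) then
    "administration-hr"
  else
  let training_keywords : List String := ["training", "instruction", "development-officer"]
  if training_keywords.any (fun kw => PySem.Str.isIn kw career_lower) then
    "training-development"
  else
  let police_keywords : List String := ["police", "military-police"]
  if police_keywords.any (fun kw => PySem.Str.isIn kw career_lower) then
    "police-security"
  else
  if PySem.Str.isIn "musician" career_lower then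
    "music"
  else
  if PySem.Str.isIn "officer" career_lower then
    "officer-general"
  else
    "ncm-general"

-- ===== PORT B =====
-- Families indexed by priority rank; the last entry is the no-match default.
def pvFamilyByRank : List String :=
  ["medical-health", "engineering-technical", "combat-operations", "intelligence-signals",
   "support-logistics", "administration-hr", "training-development", "police-security",
   "music", "officer-general", "ncm-general"]

-- The flat keyword -> rank dict of Source B, in its insertion order.
def pvKeywordRank : List (String × Nat) :=
  [("medical", 0), ("nurse", 0), ("physician", 0), ("dental", 0), ("pharmacy", 0),
   ("health", 0), ("technologist", 0), ("physiotherapy", 0), ("bioscience", 0),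
   ("engineer", 1), ("technician", 1), ("systems", 1), ("electronics", 1),
   ("construction", 1), ("electrical", 1), ("mechanical", 1), ("avionics", 1),
   ("aerospace", 1), ("weapons", 1), ("marine-tech", 1), ("aviation", 1),
   ("infantry", 2), ("armour", 2), ("artillery", 2), ("combat", 2), ("gunner", 2),
   ("soldier", 2), ("warfare", 2), ("pilot", 2), ("diver", 2),
   ("intelligence", 3), ("signals", 3), ("communicator", 3), ("cyber", 3),
   ("sensor", 3), ("operator", 3), ("sonar", 3),
   ("logistics", 4), ("supply", 4), ("traffic", 4), ("cook", 4), ("steward", 4),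
   ("postal", 4), ("firefighter", 4), ("mobile-support", 4),
   ("admin", 5), ("human-resources", 5), ("financial", 5), ("legal", 5),
   ("public-affairs", 5), ("chaplain", 5), ("personnel", 5),
   ("training", 6), ("instruction", 6), ("development-officer", 6),
   ("police", 7), ("military-police", 7),
   ("musician", 8),
   ("officer", 9)]

def infer_job_family_from_career_id_py_alt (career_id : String) : String :=
  let career_lower := PySem.Str.lower career_id
  -- min((rank for kw, rank in _KEYWORD_RANK.items() if kw in career_lower), default=len(_FAMILY_BY_RANK)-1)
  let best := PySem.List.minD
    ((pvKeywordRank.filter (fun p => PySem.Str.isIn p.1 career_lower)).map Prod.snd)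
    (fun r => r) (pvFamilyByRank.length - 1)
  -- _FAMILY_BY_RANK[best]; best ≤ 10 always, so the index is in range (exact here)
  pvFamilyByRank.getD best ""

-- ===== PRECONDITION & SPEC =====
def Spec_infer_job_family_from_career_id_py (career_id : String) (out : String) : Prop := out = infer_job_family_from_career_id_py_alt career_id
instance (career_id : String) (out : String) : Decidable (Spec_infer_job_family_from_career_id_py career_id out) := by unfold Spec_infer_job_family_from_career_id_py; infer_instance

-- ===== CLAIM =====
def Claim_equal_infer_job_family_from_career_id_py : Prop := ∀ (career_id : String), Dom_infer_job_family_from_career_id_py career_id → Spec_infer_job_family_from_career_id_py career_id (infer_job_family_from_career_id_py career_id)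

-- ===== LEMMAS AND PROOFS =====

-- a keyword group: every keyword of the list tagged with the group's rank
def pvG (r : Nat) (kws : List String) : List (String × Nat) := kws.map (fun kw => (kw, r))

-- Source B's flat dict, regrouped by rank (definitionally the same list)
def pvGrouped : List (String × Nat) :=
  pvG 0 ["medical", "nurse", "physician", "dental", "pharmacy",
         "health", "technologist", "physiotherapy", "bioscience"] ++
  pvG 1 ["engineer", "technician", "systems", "electronics",
         "construction", "electrical", "mechanical", "avionics",
         "aerospace", "weapons", "marine-tech", "aviation"] ++
  pvG 2 ["infantry", "armour", "artillery", "combat", "gunner",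
         "soldier", "warfare", "pilot", "diver"] ++
  pvG 3 ["intelligence", "signals", "communicator", "cyber",
         "sensor", "operator", "sonar"] ++
  pvG 4 ["logistics", "supply", "traffic", "cook", "steward",
         "postal", "firefighter", "mobile-support"] ++
  pvG 5 ["admin", "human-resources", "financial", "legal",
         "public-affairs", "chaplain", "personnel"] ++
  pvG 6 ["training", "instruction", "development-officer"] ++
  pvG 7 ["police", "military-police"] ++
  pvG 8 ["musician"] ++
  pvG 9 ["officer"]

theorem pvKeywordRank_eq : pvKeywordRank = pvGrouped := rfl

-- the matching ranks contributed by one group: its rank, once per matching keyword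
theorem pvG_ranks (mp : String × Nat → Bool) (r : Nat) (kws : List String) :
    ((pvG r kws).filter mp).map Prod.snd = List.replicate ((pvG r kws).countP mp) r := by
  induction kws with
  | nil => rfl
  | cons kw kws ih =>
    cases h : mp (kw, r) <;>
      simp [pvG, h, List.replicate_succ] at * <;>
      exact ih

-- a min-fold over n copies of r takes min with r iff n ≠ 0
theorem pvFoldMin_replicate (b r : Nat) (n : Nat) :
    List.foldl min b (List.replicate n r) = if n = 0 then b else min b r := by
  induction n generalizing b with
  | zero => rfl
  | succ n ih =>
    simp [List.replicate_succ, List.foldl_cons, ih]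

-- Python's min(xs, default=d) is the running-min fold when d bounds every element
theorem pvMinD_id_foldl (L : List Nat) (d : Nat) (h : ∀ x ∈ L, x ≤ d) :
    PySem.List.minD L (fun y => y) d = L.foldl min d := by
  cases L with
  | nil => rfl
  | cons x t =>
    rw [PySem.List.minD, PySem.List.min?_id_cons, Option.getD_some,
        List.foldl_cons, min_eq_right (h x (by simp))]

-- countP = 0 exactly when any = false
theorem pvCount_any (q : String → Bool) (l : List String) :
    l.countP q = 0 ↔ l.any q = false := by
  simp [List.countP_eq_zero, List.any_eq_false]

-- ===== VERDICT =====
theorem infer_job_family_from_career_id_py_spec : Claim_equal_infer_job_family_from_career_id_py := by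
  intro career_id _
  unfold Spec_infer_job_family_from_career_id_py
  have hlen : pvFamilyByRank.length - 1 = 10 := rfl
  simp only [infer_job_family_from_career_id_py, infer_job_family_from_career_id_py_alt,
    hlen, pvKeywordRank_eq, pvGrouped, PySem.Str.isIn, PySem.Str.lower,
    List.filter_append, List.map_append]
  simp only [pvG_ranks]
  simp only [pvG, List.countP_map, Function.comp_def]
  rw [pvMinD_id_foldl _ 10 (by
    intro x hx
    simp only [List.mem_append, List.mem_replicate] at hx
    omega)]
  simp only [List.foldl_append, pvFoldMin_replicate]
  have hAny : ∀ kws : List String,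
      ((kws.any (fun kw => PySem.Chars.isIn kw.toList (String.ofList (PySem.Chars.lower career_id.toList)).toList)) = true)
        ↔ ¬ (kws.countP (fun kw => PySem.Chars.isIn kw.toList (String.ofList (PySem.Chars.lower career_id.toList)).toList) = 0) := by
    intro kws; rw [pvCount_any]; simp
  have hone : ∀ kw : String,
      ((PySem.Chars.isIn kw.toList (String.ofList (PySem.Chars.lower career_id.toList)).toList) = true)
        ↔ ¬ (List.countP (fun k2 => PySem.Chars.isIn k2.toList (String.ofList (PySem.Chars.lower career_id.toList)).toList) [kw] = 0) := by
    intro kw; rw [pvCount_any]; simp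
  simp only [hAny, hone]
  by_cases c0 : List.countP (fun kw => PySem.Chars.isIn kw.toList (String.ofList (PySem.Chars.lower career_id.toList)).toList)
      ["medical", "nurse", "physician", "dental", "pharmacy",
       "health", "technologist", "physiotherapy", "bioscience"] = 0
  case neg =>
    simp only [c0]
    norm_num [Nat.min_def, ite_self, pvFamilyByRank, List.getD]
  by_cases c1 : List.countP (fun kw => PySem.Chars.isIn kw.toList (String.ofList (PySem.Chars.lower career_id.toList)).toList)
      ["engineer", "technician", "systems", "electronics",
       "construction", "electrical", "mechanical", "avionics",
       "aerospace", "weapons", "marine-tech", "aviation"] = 0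
  case neg =>
    simp only [c0, c1]
    norm_num [Nat.min_def, ite_self, pvFamilyByRank, List.getD]
  by_cases c2 : List.countP (fun kw => PySem.Chars.isIn kw.toList (String.ofList (PySem.Chars.lower career_id.toList)).toList)
      ["infantry", "armour", "artillery", "combat", "gunner",
       "soldier", "warfare", "pilot", "diver"] = 0
  case neg =>
    simp only [c0, c1, c2]
    norm_num [Nat.min_def, ite_self, pvFamilyByRank, List.getD]
  by_cases c3 : List.countP (fun kw => PySem.Chars.isIn kw.toList (String.ofList (PySem.Chars.lower career_id.toList)).toList)
      ["intelligence", "signals", "communicator", "cyber",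
       "sensor", "operator", "sonar"] = 0
  case neg =>
    simp only [c0, c1, c2, c3]
    norm_num [Nat.min_def, ite_self, pvFamilyByRank, List.getD]
  by_cases c4 : List.countP (fun kw => PySem.Chars.isIn kw.toList (String.ofList (PySem.Chars.lower career_id.toList)).toList)
      ["logistics", "supply", "traffic", "cook", "steward",
       "postal", "firefighter", "mobile-support"] = 0
  case neg =>
    simp only [c0, c1, c2, c3, c4]
    norm_num [Nat.min_def, ite_self, pvFamilyByRank, List.getD]
  by_cases c5 : List.countP (fun kw => PySem.Chars.isIn kw.toList (String.ofList (PySem.Chars.lower career_id.toList)).toList)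
      ["admin", "human-resources", "financial", "legal",
       "public-affairs", "chaplain", "personnel"] = 0
  case neg =>
    simp only [c0, c1, c2, c3, c4, c5]
    norm_num [Nat.min_def, ite_self, pvFamilyByRank, List.getD]
  by_cases c6 : List.countP (fun kw => PySem.Chars.isIn kw.toList (String.ofList (PySem.Chars.lower career_id.toList)).toList)
      ["training", "instruction", "development-officer"] = 0
  case neg =>
    simp only [c0, c1, c2, c3, c4, c5, c6]
    norm_num [Nat.min_def, ite_self, pvFamilyByRank, List.getD]
  by_cases c7 : List.countP (fun kw => PySem.Chars.isIn kw.toList (String.ofList (PySem.Chars.lower career_id.toList)).toList)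
      ["police", "military-police"] = 0
  case neg =>
    simp only [c0, c1, c2, c3, c4, c5, c6, c7]
    norm_num [Nat.min_def, ite_self, pvFamilyByRank, List.getD]
  by_cases c8 : List.countP (fun kw => PySem.Chars.isIn kw.toList (String.ofList (PySem.Chars.lower career_id.toList)).toList)
      ["musician"] = 0
  case neg =>
    simp only [c0, c1, c2, c3, c4, c5, c6, c7, c8]
    norm_num [Nat.min_def, ite_self, pvFamilyByRank, List.getD]
  by_cases c9 : List.countP (fun kw => PySem.Chars.isIn kw.toList (String.ofList (PySem.Chars.lower career_id.toList)).toList)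
      ["officer"] = 0
  case neg =>
    simp only [c0, c1, c2, c3, c4, c5, c6, c7, c8, c9]
    norm_num [Nat.min_def, ite_self, pvFamilyByRank, List.getD]
  simp only [c0, c1, c2, c3, c4, c5, c6, c7, c8, c9]
  norm_num [Nat.min_def, ite_self, pvFamilyByRank, List.getD]
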